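-- pv_equiv track=rewrite | github.com/Anam258/the-evolution-of-todo | todo-phase-III/backend/src/middleware/auth_middleware.py | _is_public
-- ===== SOURCE A (Python) =====
-- PUBLIC_PATHS = frozenset({
--     "/", "/health", "/monitoring/health", "/monitoring/metrics",
--     "/docs", "/redoc", "/openapi.json",
-- })
--
-- PUBLIC_AUTH_PATHS = frozenset({
--     "/auth/register",
--     "/auth/login",
--     "/auth/logout",
--     "/auth/health",
--     "/auth/callback",
-- })
--
-- _API_PREFIXES = ("/api/v1",)
--
-- def _is_public(path: str) -> bool:
--     """Return True if this path should skip JWT verification entirely."""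
--     if path in PUBLIC_PATHS:
--         return True
--     # Strip version prefix so /api/v1/auth/register matches /auth/register
--     normalized = path
--     for prefix in _API_PREFIXES:
--         if path.startswith(prefix):
--             normalized = path[len(prefix):]
--             break
--     return normalized in PUBLIC_AUTH_PATHS
-- ===== SOURCE B (Python) =====
-- PUBLIC_PATHS = frozenset({
--     "/", "/health", "/monitoring/health", "/monitoring/metrics",
--     "/docs", "/redoc", "/openapi.json",
-- })
--
-- PUBLIC_AUTH_PATHS = frozenset({
--     "/auth/register",
--     "/auth/login",
--     "/auth/logout",
--     "/auth/health",
--     "/auth/callback",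
-- })
--
-- _API_PREFIXES = ("/api/v1",)
--
-- # One precomputed table: public paths, auth paths, and each auth path behind
-- # each API prefix.  Lookup is a single membership test, no per-call loop.
-- ALL_PUBLIC = PUBLIC_PATHS | PUBLIC_AUTH_PATHS | frozenset(
--     prefix + ap for prefix in _API_PREFIXES for ap in PUBLIC_AUTH_PATHS
-- )
--
-- def _is_public(path: str) -> bool:
--     """Return True if this path should skip JWT verification entirely."""
--     return path in ALL_PUBLIC
-- ===== Notes on version B (the rewrite author's own statement) =====
-- stated objective: simpler
-- what changed: Precompute one module-level set containing the public paths, the auth paths, and each API-prefixed auth path, so the per-call prefix-stripping loop and two separate membership tests collapse into a single set lookup.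
import Mathlib
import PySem

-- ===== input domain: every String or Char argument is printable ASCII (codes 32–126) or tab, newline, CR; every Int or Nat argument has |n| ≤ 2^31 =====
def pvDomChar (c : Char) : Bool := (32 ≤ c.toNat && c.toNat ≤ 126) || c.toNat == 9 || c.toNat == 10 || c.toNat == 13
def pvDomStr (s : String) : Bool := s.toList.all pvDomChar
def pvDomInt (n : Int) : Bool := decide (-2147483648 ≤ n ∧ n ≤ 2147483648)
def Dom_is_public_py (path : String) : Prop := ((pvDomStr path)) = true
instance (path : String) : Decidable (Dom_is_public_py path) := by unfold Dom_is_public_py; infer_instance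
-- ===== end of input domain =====

-- B replaces A's per-call prefix-stripping loop and two membership tests by a single
-- membership test in one precomputed table of all public paths (objective: simpler).

-- ===== PORT A =====
def pubPathsA : List String :=
  ["/", "/health", "/monitoring/health", "/monitoring/metrics", "/docs", "/redoc", "/openapi.json"]

def authPathsA : List String :=
  ["/auth/register", "/auth/login", "/auth/logout", "/auth/health", "/auth/callback"]

def apiPrefixesA : List String := ["/api/v1"]

-- the 'for prefix in _API_PREFIXES: if path.startswith(prefix): normalized = path[len(prefix):]; break' loop
def stripLoopA : List String → String → String
  | [], path => path
  | p :: rest, path =>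
    if PySem.Str.startswith path p then
      PySem.Str.slice path (some (PySem.Str.len p : Int)) none
    else stripLoopA rest path

def is_public_py (path : String) : Bool :=
  if pubPathsA.contains path then true
  else authPathsA.contains (stripLoopA apiPrefixesA path)

-- ===== PORT B =====
def pubPathsB : List String :=
  ["/", "/health", "/monitoring/health", "/monitoring/metrics", "/docs", "/redoc", "/openapi.json"]

def authPathsB : List String :=
  ["/auth/register", "/auth/login", "/auth/logout", "/auth/health", "/auth/callback"]

def apiPrefixesB : List String := ["/api/v1"]

-- ALL_PUBLIC, built once at module level (frozenset union → set of distinct elements)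
def allPublicB : List String :=
  PySem.Set.ofList
    (pubPathsB ++ authPathsB ++ apiPrefixesB.flatMap (fun pre => authPathsB.map (fun ap => pre ++ ap)))

def is_public_py_alt (path : String) : Bool := allPublicB.contains path

-- ===== PRECONDITION & SPEC =====
def Spec_is_public_py (path : String) (out : Bool) : Prop := out = is_public_py_alt path
instance (path : String) (out : Bool) : Decidable (Spec_is_public_py path out) := by unfold Spec_is_public_py; infer_instance

-- ===== CLAIM (what is proved, stated in full; the proofs are below) =====
def Claim_equal_is_public_py : Prop := ∀ (path : String), Dom_is_public_py path → Spec_is_public_py path (is_public_py path)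

-- ===== LEMMAS AND PROOFS =====
set_option maxHeartbeats 1600000

theorem allPublicB_eq : allPublicB =
    ["/", "/health", "/monitoring/health", "/monitoring/metrics", "/docs", "/redoc", "/openapi.json",
     "/auth/register", "/auth/login", "/auth/logout", "/auth/health", "/auth/callback",
     "/api/v1/auth/register", "/api/v1/auth/login", "/api/v1/auth/logout",
     "/api/v1/auth/health", "/api/v1/auth/callback"] := by
  decide

theorem drop_len_eq_iff {p x s : List Char} (h : p <+: x) :
    x.drop p.length = s ↔ x = p ++ s := by
  obtain ⟨t, rfl⟩ := h
  simp

-- path[7:] = s  ↔  path = "/api/v1" + s, provided path starts with "/api/v1"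
theorem slice7_eq_iff (path s : String) (h : PySem.Str.startswith path "/api/v1" = true) :
    PySem.Str.slice path (some 7) none = s ↔ path = "/api/v1" ++ s := by
  have hp : "/api/v1".toList <+: path.toList := by
    simpa [PySem.Chars.startswith_iff] using h
  have h7 : ("/api/v1".toList).length = 7 := by decide
  have hsl : (PySem.Str.slice path (some 7) none).toList = path.toList.drop 7 := by
    have := PySem.List.slice_from_natCast path.toList 7
    norm_num at this
    simp [this]
  rw [← String.toList_inj, ← String.toList_inj, hsl, String.toList_append,
    ← drop_len_eq_iff hp, h7]

theorem is_public_py_spec : Claim_equal_is_public_py := by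
  intro path _
  unfold Spec_is_public_py
  rw [Bool.eq_iff_iff]
  by_cases h : PySem.Str.startswith path "/api/v1" = true
  · -- path starts with "/api/v1": the strip loop keeps path[7:]
    have hstrip : stripLoopA apiPrefixesA path = PySem.Str.slice path (some 7) none := by
      have hlen : PySem.Str.len "/api/v1" = 7 := by decide
      simp only [apiPrefixesA, stripLoopA, h, if_true, hlen]
    have n1 : path ≠ "/auth/register" := by rintro rfl; exact absurd h (by decide)
    have n2 : path ≠ "/auth/login" := by rintro rfl; exact absurd h (by decide)
    have n3 : path ≠ "/auth/logout" := by rintro rfl; exact absurd h (by decide)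
    have n4 : path ≠ "/auth/health" := by rintro rfl; exact absurd h (by decide)
    have n5 : path ≠ "/auth/callback" := by rintro rfl; exact absurd h (by decide)
    have e1 : ("/api/v1" ++ "/auth/register" : String) = "/api/v1/auth/register" := by decide
    have e2 : ("/api/v1" ++ "/auth/login" : String) = "/api/v1/auth/login" := by decide
    have e3 : ("/api/v1" ++ "/auth/logout" : String) = "/api/v1/auth/logout" := by decide
    have e4 : ("/api/v1" ++ "/auth/health" : String) = "/api/v1/auth/health" := by decide
    have e5 : ("/api/v1" ++ "/auth/callback" : String) = "/api/v1/auth/callback" := by decide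
    simp only [is_public_py, is_public_py_alt, allPublicB_eq, pubPathsA, authPathsA, hstrip]
    simp [slice7_eq_iff _ _ h, e1, e2, e3, e4, e5]
    tauto
  · -- path does not start with "/api/v1": the strip loop leaves path unchanged
    have hstrip : stripLoopA apiPrefixesA path = path := by
      have h' := h
      simp at h'
      simp [apiPrefixesA, stripLoopA, h']
    have n1 : path ≠ "/api/v1/auth/register" := by rintro rfl; exact h (by decide)
    have n2 : path ≠ "/api/v1/auth/login" := by rintro rfl; exact h (by decide)
    have n3 : path ≠ "/api/v1/auth/logout" := by rintro rfl; exact h (by decide)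
    have n4 : path ≠ "/api/v1/auth/health" := by rintro rfl; exact h (by decide)
    have n5 : path ≠ "/api/v1/auth/callback" := by rintro rfl; exact h (by decide)
    simp only [is_public_py, is_public_py_alt, allPublicB_eq, pubPathsA, authPathsA, hstrip]
    simp
    tauto
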